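-- pv_equiv track=rewrite | github.com/arijitchowdhury80/partnerforge | backend/app/models/lists.py | detect_column_mapping
-- ===== SOURCE A (Python) =====
-- COLUMN_MAPPINGS = {
--     # Domain (REQUIRED - one of these must match)
--     "domain": [
--         "domain", "website", "company_website", "url", "web",
--         "company_domain", "site", "webpage"
--     ],
--
--     # Company name
--     "company_name": [
--         "account_name", "company", "company_name", "name", "account",
--         "organization", "org", "business_name"
--     ],
--
--     # External IDs
--     "salesforce_id": [
--         "account_id", "18_digit_account_id", "sf_id", "salesforce_id",
--         "sfdc_id", "id"
--     ],
--     "demandbase_id": [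
--         "abm_id", "demandbase_id", "db_id", "demandbase_company_id"
--     ],
--     "hubspot_id": [
--         "hubspot_id", "hs_id", "hubspot_company_id"
--     ],
--
--     # Pre-existing data (preserved, not overwritten)
--     "revenue": [
--         "revenue", "annual_revenue", "arr", "expected_revenue",
--         "company_revenue", "yearly_revenue"
--     ],
--     "traffic": [
--         "traffic", "monthly_visits", "visits", "monthly_traffic",
--         "web_traffic", "monthly_visitors"
--     ],
--     "industry": [
--         "industry", "vertical", "demandbase_industry", "naics_description",
--         "sector", "market", "demandbase_sub_industry"
--     ],
--     "employee_count": [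
--         "employees", "employee_count", "company_size", "headcount",
--         "num_employees", "staff_count"
--     ],
--
--     # Assignment
--     "owner": [
--         "account_owner", "owner", "sales_rep", "ae",
--         "demandbase_account_owner_name", "assigned_to", "rep"
--     ],
--     "region": [
--         "sales_region", "region", "territory", "account_region",
--         "geo", "geography"
--     ],
--
--     # ABM context
--     "journey_stage": [
--         "journey_stage", "stage", "abx_status", "buyer_stage",
--         "funnel_stage", "sales_stage"
--     ],
--     "engagement_score": [
--         "engagement_points", "engagement_score", "score",
--         "intent_score", "abm_score", "engagement_points_3_mo"
--     ],
--     "target_account": [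
--         "target_account", "is_target", "named_account", "tier"
--     ],
--
--     # Ticker (for public companies)
--     "ticker": [
--         "ticker_symbol", "ticker", "stock_symbol", "symbol"
--     ],
-- }
--
-- def detect_column_mapping(headers: list) -> dict:
--     """
--     Auto-detect column mappings from CSV headers.
--
--     Args:
--         headers: List of column header strings
--
--     Returns:
--         Dict mapping standard field names to CSV column names
--     """
--     mapping = {}
--     headers_lower = {h.lower().replace(" ", "_").replace("-", "_"): h for h in headers}
--
--     for field, candidates in COLUMN_MAPPINGS.items():
--         for candidate in candidates:
--             candidate_normalized = candidate.lower().replace(" ", "_").replace("-", "_")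
--             if candidate_normalized in headers_lower:
--                 mapping[field] = headers_lower[candidate_normalized]
--                 break
--
--     return mapping
-- ===== SOURCE B (Python) =====
-- # Inverted index of the module constant COLUMN_MAPPINGS: normalized candidate -> (field, priority).
-- _INDEX = {
--     'domain': ('domain', 0),
--     'website': ('domain', 1),
--     'company_website': ('domain', 2),
--     'url': ('domain', 3),
--     'web': ('domain', 4),
--     'company_domain': ('domain', 5),
--     'site': ('domain', 6),
--     'webpage': ('domain', 7),
--     'account_name': ('company_name', 0),
--     'company': ('company_name', 1),
--     'company_name': ('company_name', 2),
--     'name': ('company_name', 3),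
--     'account': ('company_name', 4),
--     'organization': ('company_name', 5),
--     'org': ('company_name', 6),
--     'business_name': ('company_name', 7),
--     'account_id': ('salesforce_id', 0),
--     '18_digit_account_id': ('salesforce_id', 1),
--     'sf_id': ('salesforce_id', 2),
--     'salesforce_id': ('salesforce_id', 3),
--     'sfdc_id': ('salesforce_id', 4),
--     'id': ('salesforce_id', 5),
--     'abm_id': ('demandbase_id', 0),
--     'demandbase_id': ('demandbase_id', 1),
--     'db_id': ('demandbase_id', 2),
--     'demandbase_company_id': ('demandbase_id', 3),
--     'hubspot_id': ('hubspot_id', 0),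
--     'hs_id': ('hubspot_id', 1),
--     'hubspot_company_id': ('hubspot_id', 2),
--     'revenue': ('revenue', 0),
--     'annual_revenue': ('revenue', 1),
--     'arr': ('revenue', 2),
--     'expected_revenue': ('revenue', 3),
--     'company_revenue': ('revenue', 4),
--     'yearly_revenue': ('revenue', 5),
--     'traffic': ('traffic', 0),
--     'monthly_visits': ('traffic', 1),
--     'visits': ('traffic', 2),
--     'monthly_traffic': ('traffic', 3),
--     'web_traffic': ('traffic', 4),
--     'monthly_visitors': ('traffic', 5),
--     'industry': ('industry', 0),
--     'vertical': ('industry', 1),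
--     'demandbase_industry': ('industry', 2),
--     'naics_description': ('industry', 3),
--     'sector': ('industry', 4),
--     'market': ('industry', 5),
--     'demandbase_sub_industry': ('industry', 6),
--     'employees': ('employee_count', 0),
--     'employee_count': ('employee_count', 1),
--     'company_size': ('employee_count', 2),
--     'headcount': ('employee_count', 3),
--     'num_employees': ('employee_count', 4),
--     'staff_count': ('employee_count', 5),
--     'account_owner': ('owner', 0),
--     'owner': ('owner', 1),
--     'sales_rep': ('owner', 2),
--     'ae': ('owner', 3),
--     'demandbase_account_owner_name': ('owner', 4),
--     'assigned_to': ('owner', 5),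
--     'rep': ('owner', 6),
--     'sales_region': ('region', 0),
--     'region': ('region', 1),
--     'territory': ('region', 2),
--     'account_region': ('region', 3),
--     'geo': ('region', 4),
--     'geography': ('region', 5),
--     'journey_stage': ('journey_stage', 0),
--     'stage': ('journey_stage', 1),
--     'abx_status': ('journey_stage', 2),
--     'buyer_stage': ('journey_stage', 3),
--     'funnel_stage': ('journey_stage', 4),
--     'sales_stage': ('journey_stage', 5),
--     'engagement_points': ('engagement_score', 0),
--     'engagement_score': ('engagement_score', 1),
--     'score': ('engagement_score', 2),
--     'intent_score': ('engagement_score', 3),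
--     'abm_score': ('engagement_score', 4),
--     'engagement_points_3_mo': ('engagement_score', 5),
--     'target_account': ('target_account', 0),
--     'is_target': ('target_account', 1),
--     'named_account': ('target_account', 2),
--     'tier': ('target_account', 3),
--     'ticker_symbol': ('ticker', 0),
--     'ticker': ('ticker', 1),
--     'stock_symbol': ('ticker', 2),
--     'symbol': ('ticker', 3),
-- }
--
-- # Field names in COLUMN_MAPPINGS declaration order (the output order).
-- _FIELDS = ['domain', 'company_name', 'salesforce_id', 'demandbase_id', 'hubspot_id', 'revenue', 'traffic', 'industry', 'employee_count', 'owner', 'region', 'journey_stage', 'engagement_score', 'target_account', 'ticker']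
--
--
-- def detect_column_mapping(headers: list) -> dict:
--     """
--     Auto-detect column mappings from CSV headers.
--
--     Single pass over the headers against a precomputed inverted index:
--     for each header, look up its normalized form; per field keep the header
--     whose candidate priority is smallest (a later header wins ties).
--     """
--     best = {}
--     for h in headers:
--         n = h.lower().replace(" ", "_").replace("-", "_")
--         hit = _INDEX.get(n)
--         if hit is not None:
--             field, i = hit
--             if field not in best or i <= best[field][0]:
--                 best[field] = (i, h)
--     return {f: best[f][1] for f in _FIELDS if f in best}
-- ===== Notes on version B (the rewrite author's own statement) =====
-- stated objective: alternative
-- what changed: A scans each field's candidate list against a dict of normalized headers; B precomputes an inverted index (normalized candidate -> field, priority) and makes a single pass over the headers, keeping per field the header with the smallest candidate priority (later header wins ties), then emits fields in declaration order.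
import Mathlib
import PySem

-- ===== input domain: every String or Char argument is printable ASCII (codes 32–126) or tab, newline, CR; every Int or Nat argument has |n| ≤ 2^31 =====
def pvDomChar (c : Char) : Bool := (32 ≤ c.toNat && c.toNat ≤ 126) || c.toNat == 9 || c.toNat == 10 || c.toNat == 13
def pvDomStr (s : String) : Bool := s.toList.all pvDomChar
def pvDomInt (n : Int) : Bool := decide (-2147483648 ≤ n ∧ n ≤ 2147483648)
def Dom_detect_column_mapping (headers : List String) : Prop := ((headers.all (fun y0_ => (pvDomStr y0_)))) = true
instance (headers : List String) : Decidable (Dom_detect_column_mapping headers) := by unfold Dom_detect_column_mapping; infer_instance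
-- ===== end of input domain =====

-- B replaces A's per-field scan of candidate lists against a normalized-header dict by a single
-- pass over the headers against a precomputed inverted index (candidate → field, priority);
-- objective: alternative (same cost on this fixed table, different data structure and traversal).

-- s.lower().replace(" ", "_").replace("-", "_")  (the same expression in both Pythons)
def pvNorm (s : String) : String :=
  PySem.Str.replace (PySem.Str.replace (PySem.Str.lower s) " " "_") "-" "_"

-- ===== PORT A =====
-- module constant COLUMN_MAPPINGS of Source A
def COLUMN_MAPPINGS : List (String × List String) :=
  [
    ("domain", ["domain", "website", "company_website", "url", "web", "company_domain", "site", "webpage"]),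
    ("company_name", ["account_name", "company", "company_name", "name", "account", "organization", "org", "business_name"]),
    ("salesforce_id", ["account_id", "18_digit_account_id", "sf_id", "salesforce_id", "sfdc_id", "id"]),
    ("demandbase_id", ["abm_id", "demandbase_id", "db_id", "demandbase_company_id"]),
    ("hubspot_id", ["hubspot_id", "hs_id", "hubspot_company_id"]),
    ("revenue", ["revenue", "annual_revenue", "arr", "expected_revenue", "company_revenue", "yearly_revenue"]),
    ("traffic", ["traffic", "monthly_visits", "visits", "monthly_traffic", "web_traffic", "monthly_visitors"]),
    ("industry", ["industry", "vertical", "demandbase_industry", "naics_description", "sector", "market", "demandbase_sub_industry"]),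
    ("employee_count", ["employees", "employee_count", "company_size", "headcount", "num_employees", "staff_count"]),
    ("owner", ["account_owner", "owner", "sales_rep", "ae", "demandbase_account_owner_name", "assigned_to", "rep"]),
    ("region", ["sales_region", "region", "territory", "account_region", "geo", "geography"]),
    ("journey_stage", ["journey_stage", "stage", "abx_status", "buyer_stage", "funnel_stage", "sales_stage"]),
    ("engagement_score", ["engagement_points", "engagement_score", "score", "intent_score", "abm_score", "engagement_points_3_mo"]),
    ("target_account", ["target_account", "is_target", "named_account", "tier"]),
    ("ticker", ["ticker_symbol", "ticker", "stock_symbol", "symbol"]) ]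

-- A's inner loop: for candidate in candidates: if norm(candidate) in headers_lower: take it; break
def pvPickA (d : PySem.Dict String String) : List String → Option String
  | [] => none
  | c :: cs =>
    match d.get? (pvNorm c) with
    | some v => some v
    | none => pvPickA d cs

def detect_column_mapping (headers : List String) : List (String × String) :=
  let headers_lower : PySem.Dict String String :=
    headers.foldl (fun d h => d.insert (pvNorm h) h) PySem.Dict.empty
  (COLUMN_MAPPINGS.foldl (fun mapping fc =>
      match pvPickA headers_lower fc.2 with
      | some v => mapping.insert fc.1 v
      | none => mapping) PySem.Dict.empty).items

-- ===== PORT B =====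
-- Source B's module constant _INDEX: inverted index of COLUMN_MAPPINGS, normalized candidate → (field, priority)
def PV_INDEX : PySem.Dict String (String × Nat) :=
  PySem.Dict.mk [
    ("domain", ("domain", 0)),
    ("website", ("domain", 1)),
    ("company_website", ("domain", 2)),
    ("url", ("domain", 3)),
    ("web", ("domain", 4)),
    ("company_domain", ("domain", 5)),
    ("site", ("domain", 6)),
    ("webpage", ("domain", 7)),
    ("account_name", ("company_name", 0)),
    ("company", ("company_name", 1)),
    ("company_name", ("company_name", 2)),
    ("name", ("company_name", 3)),
    ("account", ("company_name", 4)),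
    ("organization", ("company_name", 5)),
    ("org", ("company_name", 6)),
    ("business_name", ("company_name", 7)),
    ("account_id", ("salesforce_id", 0)),
    ("18_digit_account_id", ("salesforce_id", 1)),
    ("sf_id", ("salesforce_id", 2)),
    ("salesforce_id", ("salesforce_id", 3)),
    ("sfdc_id", ("salesforce_id", 4)),
    ("id", ("salesforce_id", 5)),
    ("abm_id", ("demandbase_id", 0)),
    ("demandbase_id", ("demandbase_id", 1)),
    ("db_id", ("demandbase_id", 2)),
    ("demandbase_company_id", ("demandbase_id", 3)),
    ("hubspot_id", ("hubspot_id", 0)),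
    ("hs_id", ("hubspot_id", 1)),
    ("hubspot_company_id", ("hubspot_id", 2)),
    ("revenue", ("revenue", 0)),
    ("annual_revenue", ("revenue", 1)),
    ("arr", ("revenue", 2)),
    ("expected_revenue", ("revenue", 3)),
    ("company_revenue", ("revenue", 4)),
    ("yearly_revenue", ("revenue", 5)),
    ("traffic", ("traffic", 0)),
    ("monthly_visits", ("traffic", 1)),
    ("visits", ("traffic", 2)),
    ("monthly_traffic", ("traffic", 3)),
    ("web_traffic", ("traffic", 4)),
    ("monthly_visitors", ("traffic", 5)),
    ("industry", ("industry", 0)),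
    ("vertical", ("industry", 1)),
    ("demandbase_industry", ("industry", 2)),
    ("naics_description", ("industry", 3)),
    ("sector", ("industry", 4)),
    ("market", ("industry", 5)),
    ("demandbase_sub_industry", ("industry", 6)),
    ("employees", ("employee_count", 0)),
    ("employee_count", ("employee_count", 1)),
    ("company_size", ("employee_count", 2)),
    ("headcount", ("employee_count", 3)),
    ("num_employees", ("employee_count", 4)),
    ("staff_count", ("employee_count", 5)),
    ("account_owner", ("owner", 0)),
    ("owner", ("owner", 1)),
    ("sales_rep", ("owner", 2)),
    ("ae", ("owner", 3)),
    ("demandbase_account_owner_name", ("owner", 4)),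
    ("assigned_to", ("owner", 5)),
    ("rep", ("owner", 6)),
    ("sales_region", ("region", 0)),
    ("region", ("region", 1)),
    ("territory", ("region", 2)),
    ("account_region", ("region", 3)),
    ("geo", ("region", 4)),
    ("geography", ("region", 5)),
    ("journey_stage", ("journey_stage", 0)),
    ("stage", ("journey_stage", 1)),
    ("abx_status", ("journey_stage", 2)),
    ("buyer_stage", ("journey_stage", 3)),
    ("funnel_stage", ("journey_stage", 4)),
    ("sales_stage", ("journey_stage", 5)),
    ("engagement_points", ("engagement_score", 0)),
    ("engagement_score", ("engagement_score", 1)),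
    ("score", ("engagement_score", 2)),
    ("intent_score", ("engagement_score", 3)),
    ("abm_score", ("engagement_score", 4)),
    ("engagement_points_3_mo", ("engagement_score", 5)),
    ("target_account", ("target_account", 0)),
    ("is_target", ("target_account", 1)),
    ("named_account", ("target_account", 2)),
    ("tier", ("target_account", 3)),
    ("ticker_symbol", ("ticker", 0)),
    ("ticker", ("ticker", 1)),
    ("stock_symbol", ("ticker", 2)),
    ("symbol", ("ticker", 3)) ]

def PV_FIELDS : List String :=
  ["domain", "company_name", "salesforce_id", "demandbase_id", "hubspot_id", "revenue", "traffic", "industry", "employee_count", "owner", "region", "journey_stage", "engagement_score", "target_account", "ticker"]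

-- Source B's loop body: look the normalized header up in the index and keep, per field, the pair
-- (priority, header) with the smallest priority; a later header overwrites on equal priority
def pvStepB (best : PySem.Dict String (Nat × String)) (h : String) :
    PySem.Dict String (Nat × String) :=
  match PV_INDEX.get? (pvNorm h) with
  | none => best
  | some (field, i) =>
    match best.get? field with
    | none => best.insert field (i, h)
    | some (j, _) => if i ≤ j then best.insert field (i, h) else best

def detect_column_mapping_alt (headers : List String) : List (String × String) :=
  let best := headers.foldl pvStepB PySem.Dict.empty
  (PV_FIELDS.foldl (fun m f =>
      match best.get? f with
      | some p => m.insert f p.2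
      | none => m) PySem.Dict.empty).items

-- ===== PRECONDITION & SPEC =====
def Spec_detect_column_mapping (headers : List String) (out : List (String × String)) : Prop := out = detect_column_mapping_alt headers
instance (headers : List String) (out : List (String × String)) : Decidable (Spec_detect_column_mapping headers out) := by unfold Spec_detect_column_mapping; infer_instance

-- ===== CLAIM (what is proved, stated in full; the proofs are below) =====
def Claim_equal_detect_column_mapping : Prop := ∀ (headers : List String), Dom_detect_column_mapping headers → Spec_detect_column_mapping headers (detect_column_mapping headers)

-- ===== LEMMAS AND PROOFS =====

-- the common per-field loop both sides reduce to: fold over the headers keeping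
-- (candidate index, header), smaller-or-equal index wins
def pvBestStep (ncs : List String) (st : Option (Nat × String)) (h : String) :
    Option (Nat × String) :=
  match PySem.List.index? ncs (pvNorm h) with
  | none => st
  | some i =>
    match st with
    | none => some (i, h)
    | some (j, v) => if i ≤ j then some (i, h) else some (j, v)

-- A's pick, instrumented with the index of the chosen candidate
def pvPickAI (d : PySem.Dict String String) : List String → Option (Nat × String)
  | [] => none
  | c :: cs =>
    match d.get? (pvNorm c) with
    | some v => some (0, v)
    | none => (pvPickAI d cs).map (fun p => (p.1 + 1, p.2))

lemma pvPickA_eq_pickAI (d : PySem.Dict String String) (cs : List String) :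
    pvPickA d cs = (pvPickAI d cs).map (·.2) := by
  induction cs with
  | nil => rfl
  | cons c cs ih =>
    simp only [pvPickA, pvPickAI]
    cases d.get? (pvNorm c) with
    | some v => rfl
    | none =>
      rw [ih]
      cases pvPickAI d cs <;> rfl

lemma pvPickAI_empty (cs : List String) :
    pvPickAI PySem.Dict.empty cs = none := by
  induction cs with
  | nil => rfl
  | cons c cs ih => simp [pvPickAI, PySem.Dict.get?_empty, ih]

-- inserting one more header into A's dict acts on the instrumented pick exactly as pvBestStep
lemma pvPickAI_insert (cs : List String) (d : PySem.Dict String String) (h : String) :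
    pvPickAI (d.insert (pvNorm h) h) cs = pvBestStep (cs.map pvNorm) (pvPickAI d cs) h := by
  induction cs with
  | nil => rfl
  | cons c cs ih =>
    by_cases hc : pvNorm c = pvNorm h
    · simp only [pvPickAI, pvBestStep, List.map_cons, hc, PySem.Dict.get?_insert_self,
        PySem.List.index?_cons_self]
      cases hst : (match d.get? (pvNorm h) with
        | some v => some (0, v)
        | none => (pvPickAI d cs).map (fun p => (p.1 + 1, p.2)) : Option (Nat × String)) with
      | none => rfl
      | some p => cases p with | mk j v => simp
    · simp only [pvPickAI, List.map_cons, PySem.Dict.get?_insert_of_ne d h hc]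
      cases hg : d.get? (pvNorm c) with
      | some v =>
        simp only [pvBestStep]
        rw [PySem.List.index?_cons_of_ne _ hc]
        cases hi : PySem.List.index? (cs.map pvNorm) (pvNorm h) with
        | none => rfl
        | some i => simp
      | none =>
        rw [ih]
        simp only [pvBestStep]
        rw [PySem.List.index?_cons_of_ne _ hc]
        cases hi : PySem.List.index? (cs.map pvNorm) (pvNorm h) with
        | none => rfl
        | some i =>
          simp only [Option.map_some]
          cases hst : pvPickAI d cs with
          | none => rfl
          | some p =>
            cases p with | mk j v =>
            by_cases hij : i ≤ j
            · simp [hij]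
            · simp [hij]

-- A side: the pick over the finished header dict IS the per-field fold over the headers
lemma pvPickAI_foldl (cs : List String) (headers : List String)
    (d : PySem.Dict String String) :
    pvPickAI (headers.foldl (fun d h => d.insert (pvNorm h) h) d) cs
      = headers.foldl (pvBestStep (cs.map pvNorm)) (pvPickAI d cs) := by
  induction headers generalizing d with
  | nil => rfl
  | cons h hs ih => simp only [List.foldl_cons, ih, pvPickAI_insert]

-- agreement of the inverted index with one field's candidate list, at one normalized string n
def pvAgree (f : String) (ncs : List String) (n : String) : Bool :=
  match PV_INDEX.get? n with
  | some gi => if gi.1 = f then PySem.List.index? ncs n == some gi.2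
               else (PySem.List.index? ncs n).isNone
  | none => (PySem.List.index? ncs n).isNone

-- B side, projected to one field: one pvStepB acts on best.get? f exactly as pvBestStep
lemma pvStepB_get (f : String) (ncs : List String) (best : PySem.Dict String (Nat × String))
    (h : String) (hG : pvAgree f ncs (pvNorm h) = true) :
    (pvStepB best h).get? f = pvBestStep ncs (best.get? f) h := by
  unfold pvStepB pvBestStep
  unfold pvAgree at hG
  cases hI : PV_INDEX.get? (pvNorm h) with
  | none =>
    rw [hI] at hG
    simp only [Option.isNone_iff_eq_none] at hG
    rw [hG]
  | some gi =>
    rw [hI] at hG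
    obtain ⟨g, i⟩ := gi
    dsimp only
    by_cases hgf : g = f
    · subst hgf
      have hG' : PySem.List.index? ncs (pvNorm h) = some i := by simpa using hG
      rw [hG']
      dsimp only
      cases hb : best.get? g with
      | none => dsimp only; exact PySem.Dict.get?_insert_self best g (i, h)
      | some jv =>
        obtain ⟨j, v⟩ := jv
        dsimp only
        by_cases hij : i ≤ j
        · rw [if_pos hij, if_pos hij]
          exact PySem.Dict.get?_insert_self best g (i, h)
        · rw [if_neg hij, if_neg hij]
          exact hb
    · have hG' : PySem.List.index? ncs (pvNorm h) = none := by
        simpa [if_neg hgf] using hG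
      rw [hG']
      dsimp only
      have hne : f ≠ g := fun e => hgf e.symm
      cases hb : best.get? g with
      | none => dsimp only; exact PySem.Dict.get?_insert_of_ne best (i, h) hne (k := g)
      | some jv =>
        obtain ⟨j, v⟩ := jv
        dsimp only
        by_cases hij : i ≤ j
        · rw [if_pos hij]
          exact PySem.Dict.get?_insert_of_ne best (i, h) hne (k := g)
        · rw [if_neg hij]

lemma pvFoldB_get (f : String) (ncs : List String) (headers : List String)
    (best : PySem.Dict String (Nat × String)) (hG : ∀ n, pvAgree f ncs n = true) :
    (headers.foldl pvStepB best).get? f = headers.foldl (pvBestStep ncs) (best.get? f) := by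
  induction headers generalizing best with
  | nil => rfl
  | cons h hs ih => simp only [List.foldl_cons, ih, pvStepB_get f ncs _ h (hG (pvNorm h))]

-- pvAgree everywhere, from its (decidable) restriction to the index keys
lemma pvAgree_of_bounded (f : String) (ncs : List String)
    (hb : ∀ n ∈ PV_INDEX.keys, pvAgree f ncs n = true)
    (hsub : ∀ n ∈ ncs, n ∈ PV_INDEX.keys) : ∀ n, pvAgree f ncs n = true := by
  intro n
  by_cases hn : n ∈ PV_INDEX.keys
  · exact hb n hn
  · have h1 : PV_INDEX.get? n = none := by
      rw [PySem.Dict.get?_eq_none_iff_not_mem_keys]; exact hn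
    have h2 : PySem.List.index? ncs n = none := by
      rw [PySem.List.index?_eq_none_iff]
      exact fun hm => hn (hsub n hm)
    unfold pvAgree
    rw [h1, h2]
    rfl

set_option maxHeartbeats 4000000 in
lemma pvAgree_bounded_all : ∀ fc ∈ COLUMN_MAPPINGS,
    (∀ n ∈ PV_INDEX.keys, pvAgree fc.1 (fc.2.map pvNorm) n = true) ∧
    (∀ n ∈ fc.2.map pvNorm, n ∈ PV_INDEX.keys) := by decide

lemma pvAgree_all : ∀ fc ∈ COLUMN_MAPPINGS, ∀ n, pvAgree fc.1 (fc.2.map pvNorm) n = true :=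
  fun fc hfc => pvAgree_of_bounded _ _ (pvAgree_bounded_all fc hfc).1 (pvAgree_bounded_all fc hfc).2

lemma pvFields_eq : PV_FIELDS = COLUMN_MAPPINGS.map Prod.fst := by decide

-- ===== VERDICT (by name: the statement is the Claim_ definition above) =====
theorem detect_column_mapping_spec : Claim_equal_detect_column_mapping := by
  intro headers _
  unfold Spec_detect_column_mapping detect_column_mapping detect_column_mapping_alt
  show (COLUMN_MAPPINGS.foldl (fun mapping fc =>
      match pvPickA (headers.foldl (fun d h => d.insert (pvNorm h) h) PySem.Dict.empty) fc.2 with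
      | some v => mapping.insert fc.1 v
      | none => mapping) PySem.Dict.empty).items
    = (PV_FIELDS.foldl (fun m f =>
      match (headers.foldl pvStepB PySem.Dict.empty).get? f with
      | some p => m.insert f p.2
      | none => m) PySem.Dict.empty).items
  rw [pvFields_eq, List.foldl_map]
  refine congrArg PySem.Dict.items ?_
  refine PySem.List.foldl_congr_mem _ _ _ _ ?_
  intro m fc hfc
  have hA : pvPickA (headers.foldl (fun d h => d.insert (pvNorm h) h) PySem.Dict.empty) fc.2
      = (headers.foldl (pvBestStep (fc.2.map pvNorm)) none).map (·.2) := by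
    rw [pvPickA_eq_pickAI, pvPickAI_foldl, pvPickAI_empty]
  have hB : (headers.foldl pvStepB PySem.Dict.empty).get? fc.1
      = headers.foldl (pvBestStep (fc.2.map pvNorm)) none := by
    rw [pvFoldB_get fc.1 _ headers _ (pvAgree_all fc hfc)]
    rfl
  rw [hA, hB]
  cases headers.foldl (pvBestStep (fc.2.map pvNorm)) none with
  | none => rfl
  | some b => rfl
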